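-- pv_equiv track=rewrite | github.com/SCSCML/gym-gobang | gym_gobang/tests/test_gobang_dqn_agent.py | policy1
-- ===== SOURCE A (Python) =====
-- def policy1(board):
--     for i in range(len(board)):
--         if i//2%2==0:
--             for j in range(0,len(board),2):
--                 yield i*len(board)+j
--         else:
--             for j in range(1,len(board),2):
--                 yield i*len(board)+j
-- ===== SOURCE B (Python) =====
-- def policy1(board):
--     n = len(board)
--     for idx in range(n * n):
--         i, j = divmod(idx, n)
--         if (i // 2) % 2 == j % 2:
--             yield idx
-- ===== Notes on version B (the rewrite author's own statement) =====
-- stated objective: simpler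
-- what changed: Replaces the nested row loop with a branch-selected stride-2 inner loop by a single flat pass over range(n*n) that emits idx exactly when divmod(idx, n) satisfies the parity predicate (i//2) % 2 == j % 2.
import Mathlib
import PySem

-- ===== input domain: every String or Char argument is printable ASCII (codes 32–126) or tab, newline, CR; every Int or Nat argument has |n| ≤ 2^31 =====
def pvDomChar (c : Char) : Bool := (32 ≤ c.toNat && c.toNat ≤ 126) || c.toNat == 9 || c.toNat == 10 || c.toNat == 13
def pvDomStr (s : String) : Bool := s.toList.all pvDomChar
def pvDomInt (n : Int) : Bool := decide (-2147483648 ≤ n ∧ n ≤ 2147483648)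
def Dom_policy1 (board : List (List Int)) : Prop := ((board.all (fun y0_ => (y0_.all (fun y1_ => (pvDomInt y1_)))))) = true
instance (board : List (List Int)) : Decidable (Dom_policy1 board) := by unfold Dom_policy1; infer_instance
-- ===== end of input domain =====

-- B replaces A's row loop with branch-selected stride-2 inner loops by one flat pass over
-- range(n*n) filtered by the parity predicate (i//2) % 2 == j % 2 (simpler, same order).
-- Both Pythons are generators; the ports collect the yielded values in order.

-- ===== PORT A =====
def policy1 (board : List (List Int)) : List Int :=
  (PySem.List.pyRange 0 (PySem.List.len board) 1).foldl
    (fun acc i =>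
      if PySem.Int.mod (PySem.Int.floordiv i 2) 2 == 0 then
        (PySem.List.pyRange 0 (PySem.List.len board) 2).foldl
          (fun acc2 j => acc2 ++ [i * PySem.List.len board + j]) acc
      else
        (PySem.List.pyRange 1 (PySem.List.len board) 2).foldl
          (fun acc2 j => acc2 ++ [i * PySem.List.len board + j]) acc) []

-- ===== PORT B =====
def policy1_alt (board : List (List Int)) : List Int :=
  let n := PySem.List.len board
  (PySem.List.pyRange 0 (n * n) 1).foldl
    (fun acc idx =>
      -- i, j = divmod(idx, n): n > 0 whenever the loop body runs, so the total floordiv/mod are exact here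
      let i := PySem.Int.floordiv idx n
      let j := PySem.Int.mod idx n
      if PySem.Int.mod (PySem.Int.floordiv i 2) 2 == PySem.Int.mod j 2 then acc ++ [idx] else acc) []

-- ===== PRECONDITION & SPEC =====
def Spec_policy1 (board : List (List Int)) (out : List Int) : Prop := out = policy1_alt board
instance (board : List (List Int)) (out : List Int) : Decidable (Spec_policy1 board out) := by unfold Spec_policy1; infer_instance

-- ===== CLAIM (what is proved, stated in full; the proofs are below) =====
def Claim_equal_policy1 : Prop := ∀ (board : List (List Int)), Dom_policy1 board → Spec_policy1 board (policy1 board)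

-- ===== LEMMAS AND PROOFS =====

-- B's filter predicate at board size n
def pvPred (n idx : Int) : Bool :=
  PySem.Int.mod (PySem.Int.floordiv (PySem.Int.floordiv idx n) 2) 2 == PySem.Int.mod (PySem.Int.mod idx n) 2

-- A's per-row block at board size n
def pvRow (n i : Int) : List Int :=
  if PySem.Int.mod (PySem.Int.floordiv i 2) 2 == 0 then (PySem.List.pyRange 0 n 2).map (fun j => i * n + j)
  else (PySem.List.pyRange 1 n 2).map (fun j => i * n + j)

lemma ite_append_eq (c : Prop) [Decidable c] (acc X Y : List Int) :
    (if c then acc ++ X else acc ++ Y) = acc ++ (if c then X else Y) := by split <;> rfl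

lemma policy1_eq_flatMap (board : List (List Int)) :
    policy1 board = (PySem.List.pyRange 0 (board.length : Int) 1).flatMap (pvRow board.length) := by
  unfold policy1
  simp only [PySem.List.len_eq, PySem.List.foldl_append_singleton_eq_map]
  simp only [ite_append_eq]
  rw [PySem.List.foldl_append_eq_flatMap]
  simp only [List.nil_append]
  rfl

lemma policy1_alt_eq_filter (board : List (List Int)) :
    policy1_alt board =
      (PySem.List.pyRange 0 ((board.length : Int) * board.length) 1).filter (pvPred board.length) := by
  unfold policy1_alt
  simp only [PySem.List.len_eq]
  show List.foldl (fun acc idx => if pvPred (board.length : Int) idx then acc ++ [idx] else acc) [] _ = _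
  rw [PySem.List.foldl_append_if_eq_filter]
  simp

lemma filt_even (m : Nat) :
    (List.range m).filter (fun k => (0 : Int) == ((k % 2 : Nat) : Int)) =
      (List.range ((m + 1) / 2)).map (fun k => 2 * k) := by
  induction m with
  | zero => rfl
  | succ m ih =>
    rw [List.range_succ, List.filter_append, ih]
    rcases Nat.even_or_odd m with he | ho
    · have h2 : m % 2 = 0 := Nat.even_iff.mp he
      have hone : List.filter (fun k => (0 : Int) == ((k % 2 : Nat) : Int)) [m] = [m] := by
        simp
        omega
      have hs : (m + 1 + 1) / 2 = (m + 1) / 2 + 1 := by omega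
      rw [hone, hs, List.range_succ, List.map_append]
      simp
      omega
    · have h2 : m % 2 = 1 := Nat.odd_iff.mp ho
      have hone : List.filter (fun k => (0 : Int) == ((k % 2 : Nat) : Int)) [m] = [] := by
        simp
        omega
      have hs : (m + 1 + 1) / 2 = (m + 1) / 2 := by omega
      rw [hone, hs, List.append_nil]

lemma filt_odd (m : Nat) :
    (List.range m).filter (fun k => (1 : Int) == ((k % 2 : Nat) : Int)) =
      (List.range (m / 2)).map (fun k => 2 * k + 1) := by
  induction m with
  | zero => rfl
  | succ m ih =>
    rw [List.range_succ, List.filter_append, ih]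
    rcases Nat.even_or_odd m with he | ho
    · have h2 : m % 2 = 0 := Nat.even_iff.mp he
      have hone : List.filter (fun k => (1 : Int) == ((k % 2 : Nat) : Int)) [m] = [] := by
        simp
        omega
      have hs : (m + 1) / 2 = m / 2 := by omega
      rw [hone, hs, List.append_nil]
    · have h2 : m % 2 = 1 := Nat.odd_iff.mp ho
      have hone : List.filter (fun k => (1 : Int) == ((k % 2 : Nat) : Int)) [m] = [m] := by
        simp
        omega
      have hs : (m + 1) / 2 = m / 2 + 1 := by omega
      rw [hone, hs, List.range_succ, List.map_append]
      simp
      omega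

lemma pyRange_even (m : Nat) :
    PySem.List.pyRange 0 (m : Int) 2 = (List.range ((m + 1) / 2)).map (fun k => ((2 * k : Nat) : Int)) := by
  rw [PySem.List.pyRange_of_pos 0 (m : Int) (by norm_num)]
  have hc : (if (0 : Int) < (m : Int) then (((m : Int) - 0 + 2 - 1) / 2).toNat else 0) = (m + 1) / 2 := by
    split <;> omega
  rw [hc]
  refine List.map_congr_left ?_
  intro k _
  push_cast
  ring

lemma pyRange_odd (m : Nat) :
    PySem.List.pyRange 1 (m : Int) 2 = (List.range (m / 2)).map (fun k => ((2 * k + 1 : Nat) : Int)) := by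
  rw [PySem.List.pyRange_of_pos 1 (m : Int) (by norm_num)]
  have hc : (if (1 : Int) < (m : Int) then (((m : Int) - 1 + 2 - 1) / 2).toNat else 0) = m / 2 := by
    split <;> omega
  rw [hc]
  refine List.map_congr_left ?_
  intro k _
  push_cast
  ring

lemma row_lemma (m : Nat) (r : Int) :
    (PySem.List.pyRange (r * m) (r * m + m) 1).filter (pvPred m) = pvRow m r := by
  rw [PySem.List.pyRange_one]
  have hb : ((r * m + m - r * m)).toNat = m := by omega
  rw [hb]
  rw [List.filter_map]
  have hpt : ∀ k ∈ List.range m,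
      (pvPred (m : Int) ∘ (fun k : Nat => r * (m : Int) + (k : Nat))) k =
        (PySem.Int.mod (PySem.Int.floordiv r 2) 2 == ((k % 2 : Nat) : Int)) := by
    intro k hk
    have hkm : k < m := List.mem_range.mp hk
    have hm' : (0 : Int) < (m : Int) := by
      have : 0 < m := by omega
      exact_mod_cast this
    have hd : PySem.Int.floordiv (r * (m : Int) + (k : Int)) (m : Int) = r := by
      rw [PySem.Int.floordiv_eq_iff_of_pos hm']
      constructor
      · exact le_add_of_nonneg_right (by positivity)
      · have hkm' : (k : Int) < (m : Int) := by exact_mod_cast hkm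
        nlinarith
    have hmod : PySem.Int.mod (r * (m : Int) + (k : Int)) (m : Int) = (k : Int) := by
      have h := PySem.Int.floordiv_mul_add_mod (r * (m : Int) + (k : Int)) (m : Int)
      rw [hd] at h
      linarith
    simp only [pvPred, Function.comp_apply, hd, hmod]
    congr 1
    exact_mod_cast PySem.Int.mod_natCast k 2
  rw [List.filter_congr hpt]
  rcases PySem.Int.mod_two_eq (PySem.Int.floordiv r 2) with hc | hc
  · rw [hc, filt_even, pvRow, if_pos (by rw [hc]; rfl)]
    rw [pyRange_even, List.map_map, List.map_map]
    rfl
  · rw [hc, filt_odd, pvRow, if_neg (by rw [hc]; decide)]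
    rw [pyRange_odd, List.map_map, List.map_map]
    rfl

lemma rows_lemma (m r : Nat) :
    (PySem.List.pyRange 0 ((r : Int) * m) 1).filter (pvPred m) =
      (PySem.List.pyRange 0 (r : Int) 1).flatMap (pvRow m) := by
  induction r with
  | zero =>
    simp only [Nat.cast_zero, zero_mul]
    rw [PySem.List.pyRange_one_eq_nil (le_refl 0)]
    simp
  | succ r ih =>
    have he : (((r + 1 : Nat) : Int)) * m = (r : Int) * m + m := by push_cast; ring
    have h1 : (0 : Int) ≤ (r : Int) * m := by positivity
    have h2 : (r : Int) * m ≤ (r : Int) * m + m := by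
      have : (0 : Int) ≤ (m : Int) := by positivity
      linarith
    rw [he, PySem.List.pyRange_one_append 0 ((r : Int) * m) ((r : Int) * m + m) h1 h2]
    rw [List.filter_append, ih, row_lemma]
    have hr : (((r + 1 : Nat) : Int)) = (r : Int) + 1 := by push_cast; ring
    rw [hr, PySem.List.pyRange_one_succ_right (by positivity)]
    simp

-- ===== VERDICT (by name: the statement is the Claim_ definition above) =====
theorem policy1_spec : Claim_equal_policy1 := by
  intro board _
  unfold Spec_policy1
  rw [policy1_eq_flatMap, policy1_alt_eq_filter, rows_lemma board.length board.length]
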